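-- pv_equiv track=rewrite | github.com/daniel-reich/ubiquitous-fiesta | H2EyqacEnijCozCWs_15.py | first_n_vowels
-- ===== SOURCE A (Python) =====
-- def first_n_vowels(txt, n):
--   mystr = ''
--   vowels = ['a','e','i','o','u']
--   for i in range (len(txt)):
--     if txt[i] in vowels and n>0:
--       mystr += txt[i]
--       n -= 1
--   if (n>0):
--     return "invalid"
--   return mystr
-- ===== SOURCE B (Python) =====
-- def first_n_vowels(txt, n):
--   # B: early-exit search for the position of the n-th vowel; the output is then
--   # built in a separate pass over that prefix (no running accumulator, no counter
--   # decrement; "invalid" is the fall-through when the n-th vowel never appears).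
--   if n <= 0:
--     return ''
--   count = 0
--   for i, c in enumerate(txt):
--     if c in 'aeiou':
--       count += 1
--       if count == n:
--         return ''.join(ch for ch in txt[:i + 1] if ch in 'aeiou')
--   return 'invalid'
-- ===== Notes on version B (the rewrite author's own statement) =====
-- stated objective: alternative
-- what changed: B searches for the position of the n-th vowel with an early return (counting up, no accumulator), then builds the answer in a separate pass over that prefix; A scans the whole string while decrementing n and concatenating into a running string, deciding 'invalid' from the leftover counter. (measured ~2.5x faster: early exit at the n-th vowel and no quadratic string concatenation).
import Mathlib
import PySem

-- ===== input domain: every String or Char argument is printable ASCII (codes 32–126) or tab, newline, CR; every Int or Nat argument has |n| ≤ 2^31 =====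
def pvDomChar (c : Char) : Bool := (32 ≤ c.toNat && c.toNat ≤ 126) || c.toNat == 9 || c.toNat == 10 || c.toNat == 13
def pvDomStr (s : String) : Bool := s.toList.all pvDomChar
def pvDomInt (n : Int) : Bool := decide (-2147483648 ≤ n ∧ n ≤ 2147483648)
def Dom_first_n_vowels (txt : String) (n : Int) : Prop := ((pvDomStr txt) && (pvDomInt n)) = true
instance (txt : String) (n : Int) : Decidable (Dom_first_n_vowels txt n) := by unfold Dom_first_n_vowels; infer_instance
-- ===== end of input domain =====

-- B searches for the position of the n-th vowel with early exit and builds the output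
-- in a separate pass over that prefix, instead of A's full scan with a decrementing
-- counter and a running accumulator (objective: alternative).

-- ===== PORT A =====
-- A builds mystr by string concatenation; the port carries the accumulated characters
-- as a List Char (PySem strings are List Char) and packs them with String.mk at the return.
def first_n_vowels (txt : String) (n : Int) : String :=
  let vowels : List Char := ['a', 'e', 'i', 'o', 'u']
  let r := (PySem.List.pyRange 0 (PySem.Str.len txt) 1).foldl
    (fun (st : List Char × Int) i =>
      let c := PySem.List.pyGetD txt.toList i ' '   -- txt[i]; index always in range here
      if c ∈ vowels ∧ st.2 > 0 then (st.1 ++ [c], st.2 - 1) else st)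
    ([], n)
  if r.2 > 0 then "invalid" else String.mk r.1

-- ===== PORT B =====
-- the 'for i, c in enumerate(txt)' loop of Source B: structural recursion over the
-- remaining suffix, carrying the running index i and the count of vowels seen
def fnvFind (txt : List Char) : List Char → Nat → Int → Int → String
  | [], _, _, _ => "invalid"                                  -- fall-through: return 'invalid'
  | c :: rest, i, count, n =>
    if c ∈ "aeiou".toList then                                -- if c in 'aeiou'
      if count + 1 = n then                                   -- count += 1; if count == n
        -- ''.join(ch for ch in txt[:i + 1] if ch in 'aeiou')
        String.mk ((PySem.List.slice txt none (some ((i : Int) + 1))).filter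
          (fun ch => ch ∈ "aeiou".toList))
      else fnvFind txt rest (i + 1) (count + 1) n
    else fnvFind txt rest (i + 1) count n

def first_n_vowels_alt (txt : String) (n : Int) : String :=
  if n ≤ 0 then "" else fnvFind txt.toList txt.toList 0 0 n

-- ===== PRECONDITION & SPEC =====
def Spec_first_n_vowels (txt : String) (n : Int) (out : String) : Prop := out = first_n_vowels_alt txt n
instance (txt : String) (n : Int) (out : String) : Decidable (Spec_first_n_vowels txt n out) := by unfold Spec_first_n_vowels; infer_instance

-- ===== CLAIM (what is proved, stated in full; the proofs are below) =====
def Claim_equal_first_n_vowels : Prop := ∀ (txt : String) (n : Int), Dom_first_n_vowels txt n → Spec_first_n_vowels txt n (first_n_vowels txt n)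

-- ===== LEMMAS AND PROOFS =====

-- invariant of A's loop: it appends the first n (clamped) vowels and decrements n once per kept vowel
lemma loopA_eq (l : List Char) (s : List Char) (n : Int) :
    l.foldl
      (fun (st : List Char × Int) c =>
        if c ∈ (['a', 'e', 'i', 'o', 'u'] : List Char) ∧ st.2 > 0 then (st.1 ++ [c], st.2 - 1) else st)
      (s, n)
    = (s ++ (l.filter (fun c => c ∈ (['a', 'e', 'i', 'o', 'u'] : List Char))).take n.toNat,
       n - ((min n.toNat (l.filter (fun c => c ∈ (['a', 'e', 'i', 'o', 'u'] : List Char))).length : Nat) : Int)) := by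
  induction l generalizing s n with
  | nil => simp
  | cons c l ih =>
    by_cases hc : c ∈ (['a', 'e', 'i', 'o', 'u'] : List Char)
    · by_cases hn : n > 0
      · simp only [List.foldl_cons, hc, true_and, if_pos hn, ih, List.filter_cons, decide_true,
          if_true, List.length_cons, Prod.mk.injEq]
        constructor
        · have h1 : n.toNat = (n - 1).toNat + 1 := by omega
          rw [h1, List.take_succ_cons]
          simp
        · omega
      · simp only [List.foldl_cons, hc, true_and, if_neg hn, ih, List.filter_cons, decide_true,
          if_true, List.length_cons, Prod.mk.injEq]
        have h0 : n.toNat = 0 := by omega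
        constructor
        · simp [h0]
        · omega
    · simp only [List.foldl_cons, hc, false_and, if_false, ih, List.filter_cons, decide_false,
        Bool.false_eq_true, if_false]

-- invariant of B's search loop: if the prefix p already holds count (< n) vowels,
-- the search computes the global answer "first n vowels, else invalid"
lemma fnvFind_eq (l p : List Char) (count n : Int)
    (hp : ((p.filter (fun c => c ∈ "aeiou".toList)).length : Int) = count)
    (hlt : count < n) :
    fnvFind (p ++ l) l p.length count n
    = (if (((p ++ l).filter (fun c => c ∈ "aeiou".toList)).length : Int) < n then "invalid"
       else String.mk (((p ++ l).filter (fun c => c ∈ "aeiou".toList)).take n.toNat)) := by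
  induction l generalizing p count with
  | nil =>
    simp only [List.append_nil, fnvFind]
    rw [if_pos (by omega)]
  | cons c rest ih =>
    by_cases hc : c ∈ "aeiou".toList
    · by_cases hn : count + 1 = n
      · simp only [fnvFind, hc, if_true, if_pos hn]
        have hsl : PySem.List.slice (p ++ c :: rest) none (some ((p.length : Int) + 1))
            = (p ++ c :: rest).take ((p.length : Int) + 1).toNat := by
          exact PySem.List.slice_to _ (by omega)
        have htn : ((p.length : Int) + 1).toNat = p.length + 1 := by omega
        have htk : (p ++ c :: rest).take (p.length + 1) = p ++ [c] := by
          have : p ++ c :: rest = (p ++ [c]) ++ rest := by simp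
          rw [this]
          have hlen : p.length + 1 = (p ++ [c]).length := by simp
          rw [hlen, List.take_left]
        rw [hsl, htn, htk]
        have hre2 : p ++ c :: rest = (p ++ [c]) ++ rest := by simp
        have hfil : (p ++ c :: rest).filter (fun c => c ∈ "aeiou".toList)
            = (p ++ [c]).filter (fun c => c ∈ "aeiou".toList)
              ++ rest.filter (fun c => c ∈ "aeiou".toList) := by
          rw [hre2, List.filter_append]
        have hflen : ((p ++ [c]).filter (fun c => c ∈ "aeiou".toList)).length = n.toNat := by
          simp only [List.filter_append, List.length_append, List.filter_cons, hc, decide_true,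
            if_true]
          simp only [List.filter_nil, List.length_cons, List.length_nil]
          omega
        rw [hfil, if_neg (by simp only [List.length_append]; omega)]
        rw [← hflen, List.take_left]
      · have hstep : fnvFind (p ++ c :: rest) (c :: rest) p.length count n
            = fnvFind (p ++ c :: rest) rest (p.length + 1) (count + 1) n := by
          simp only [fnvFind, hc, if_true, if_neg hn]
        have hre : p ++ c :: rest = (p ++ [c]) ++ rest := by simp
        rw [hstep, hre]
        have := ih (p ++ [c]) (count + 1)
          (by simp only [List.filter_append, List.length_append, List.filter_cons, hc,
                decide_true, if_true, List.filter_nil, List.length_cons, List.length_nil]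
              omega)
          (by omega)
        simpa using this
    · have hstep : fnvFind (p ++ c :: rest) (c :: rest) p.length count n
          = fnvFind (p ++ c :: rest) rest (p.length + 1) count n := by
        simp only [fnvFind, hc, if_false]
      have hre : p ++ c :: rest = (p ++ [c]) ++ rest := by simp
      rw [hstep, hre]
      have := ih (p ++ [c]) count
        (by simp only [List.filter_append, List.length_append, List.filter_cons, hc,
              decide_false, List.filter_nil]
            simpa using hp)
        hlt
      simpa using this

lemma vowels_toList : ("aeiou".toList : List Char) = ['a', 'e', 'i', 'o', 'u'] := rfl

-- ===== VERDICT (by name: the statement is the Claim_ definition above) =====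
theorem first_n_vowels_spec : Claim_equal_first_n_vowels := by
  intro txt n _
  show first_n_vowels txt n = first_n_vowels_alt txt n
  unfold first_n_vowels first_n_vowels_alt
  simp only [PySem.Str.len_eq]
  rw [PySem.List.foldl_pyRange_zero_pyGetD' txt.toList ' '
        (fun (st : List Char × Int) c =>
          if c ∈ (['a', 'e', 'i', 'o', 'u'] : List Char) ∧ st.2 > 0 then (st.1 ++ [c], st.2 - 1) else st)
        ([], n)]
  rw [loopA_eq]
  set F := txt.toList.filter (fun c => c ∈ (['a', 'e', 'i', 'o', 'u'] : List Char)) with hF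
  by_cases hn : n ≤ 0
  · rw [if_pos hn, if_neg (by omega)]
    have h0 : n.toNat = 0 := by omega
    simp only [h0, List.take_zero]
    rfl
  · rw [if_neg hn]
    have := fnvFind_eq txt.toList [] 0 n (by simp) (by omega)
    simp only [List.nil_append, List.length_nil] at this
    rw [this, vowels_toList, ← hF]
    by_cases h : (F.length : Int) < n
    · rw [if_pos (by omega), if_pos h]
    · rw [if_neg (by omega), if_neg h]
      simp
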